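-- pv_equiv track=rewrite | github.com/paulsuh/AdventOfCode-2023 | Day-12/Day-12-1.py | check_trial
-- ===== SOURCE A (Python) =====
-- def check_trial(trial_row: str, groups: list[int]) -> int:
--     trial_with_spaces = trial_row.replace(".", " ")
--     spring_runs = trial_with_spaces.split()
--     run_lengths = [
--         len(run)
--         for run in spring_runs
--     ]
--     return 1 if run_lengths == groups else 0
-- ===== SOURCE B (Python) =====
-- def check_trial(trial_row: str, groups: list[int]) -> int:
--     idx = 0
--     run = 0
--     for ch in trial_row:
--         if ch == "." or ch.isspace():
--             if run > 0:
--                 if idx >= len(groups) or groups[idx] != run: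
--                     return 0
--                 idx += 1
--                 run = 0
--         else:
--             run += 1
--     if run > 0:
--         if idx >= len(groups) or groups[idx] != run:
--             return 0
--         idx += 1
--     return 1 if idx == len(groups) else 0
-- ===== Notes on version B (the rewrite author's own statement) =====
-- stated objective: alternative
-- what changed: Single left-to-right scan that keeps only a current run length and an index into groups, rejecting on the first mismatch, instead of building the replaced string, the split word list and the length list and comparing with ==.
import Mathlib
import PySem

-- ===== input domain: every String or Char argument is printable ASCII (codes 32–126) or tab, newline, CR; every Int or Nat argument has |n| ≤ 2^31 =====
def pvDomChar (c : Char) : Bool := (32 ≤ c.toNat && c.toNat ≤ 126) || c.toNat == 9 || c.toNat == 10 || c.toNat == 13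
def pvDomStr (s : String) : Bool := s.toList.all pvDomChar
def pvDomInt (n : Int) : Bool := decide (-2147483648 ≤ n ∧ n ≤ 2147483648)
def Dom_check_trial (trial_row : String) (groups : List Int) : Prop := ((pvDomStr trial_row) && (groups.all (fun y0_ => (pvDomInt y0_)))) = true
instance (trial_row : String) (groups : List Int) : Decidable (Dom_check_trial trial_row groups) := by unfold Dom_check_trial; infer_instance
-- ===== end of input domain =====

-- B replaces A's replace+split+length-list+'==' pipeline by a single scan keeping a current
-- run length and the remaining groups, with early exit on the first mismatch (alternative
-- one-pass decomposition; no intermediate lists, not measured faster).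

-- ===== PORT A =====
def check_trial (trial_row : String) (groups : List Int) : Int :=
  let trial_with_spaces := PySem.Str.replace trial_row "." " "
  let spring_runs := PySem.Str.split₀ trial_with_spaces
  let run_lengths := spring_runs.map (fun run => PySem.Str.len run)
  if run_lengths = groups then 1 else 0

-- ===== PORT B =====
-- separator test of Source B: ch == "." or ch.isspace()
def pvSep (c : Char) : Bool := c == '.' || PySem.Chars.isspace c

-- the for-loop of Source B; B's index into groups is carried as the remaining suffix of groups,
-- the early 'return 0' becomes returning 0 from the recursion
def pvAltLoop : List Char → List Int → Nat → Int
  | [], gs, run =>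
    if run > 0 then
      match gs with
      | [] => 0
      | g :: rest => if g ≠ (run : Int) then 0 else (if rest.isEmpty then 1 else 0)
    else if gs.isEmpty then 1 else 0
  | c :: cs, gs, run =>
    if pvSep c then
      if run > 0 then
        match gs with
        | [] => 0
        | g :: rest => if g ≠ (run : Int) then 0 else pvAltLoop cs rest 0
      else pvAltLoop cs gs 0
    else pvAltLoop cs gs (run + 1)

def check_trial_alt (trial_row : String) (groups : List Int) : Int :=
  pvAltLoop trial_row.toList groups 0

-- ===== PRECONDITION & SPEC =====
def Spec_check_trial (trial_row : String) (groups : List Int) (out : Int) : Prop := out = check_trial_alt trial_row groups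
instance (trial_row : String) (groups : List Int) (out : Int) : Decidable (Spec_check_trial trial_row groups out) := by unfold Spec_check_trial; infer_instance

-- ===== CLAIM (what is proved, stated in full; the proofs are below) =====
def Claim_equal_check_trial : Prop := ∀ (trial_row : String) (groups : List Int), Dom_check_trial trial_row groups → Spec_check_trial trial_row groups (check_trial trial_row groups)

-- ===== LEMMAS AND PROOFS =====

def pvRepl (c : Char) : Char := if c = '.' then ' ' else c

-- run lengths of the words of a list under separator predicate p, with current open run r
def pvRuns (p : Char → Bool) : Nat → List Char → List Nat
  | r, [] => if r > 0 then [r] else []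
  | r, c :: cs => if p c then (if r > 0 then r :: pvRuns p 0 cs else pvRuns p 0 cs) else pvRuns p (r + 1) cs

theorem pv_replace_go (l : List Char) (fuel : Nat) (acc : List Char) (h : l.length ≤ fuel) :
    PySem.Chars.replace.go ['.'] [' '] fuel l acc = acc.reverse ++ l.map pvRepl := by
  induction l generalizing fuel acc with
  | nil =>
    cases fuel <;> rw [PySem.Chars.replace.go.eq_def] <;> simp
  | cons c t ih =>
    cases fuel with
    | zero => simp at h
    | succ f =>
      rw [PySem.Chars.replace.go.eq_def]
      simp only [List.isPrefixOf, Bool.and_true]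
      by_cases hc : c = '.'
      · subst hc
        simp only [beq_self_eq_true, if_pos]
        have hd : List.drop (['.'] : List Char).length ('.' :: t) = t := rfl
        have ha : ([' '] : List Char).reverse ++ acc = ' ' :: acc := rfl
        rw [hd, ha, ih f _ (by simpa using h)]
        simp [pvRepl]
      · have hne : ('.' == c) = false :=
          beq_eq_false_iff_ne.mpr (fun hh => hc hh.symm)
        rw [hne, if_neg (by decide), ih f _ (by simpa using h)]
        simp [pvRepl, hc]

theorem pv_replace_eq (l : List Char) :
    PySem.Chars.replace l ['.'] [' '] = l.map pvRepl := by
  rw [PySem.Chars.replace, if_neg (by decide)]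
  simpa using pv_replace_go l l.length [] le_rfl

theorem pv_split_go (l cur : List Char) (acc : List (List Char)) :
    (PySem.Chars.split₀.go l cur acc).map List.length
      = acc.reverse.map List.length ++ pvRuns PySem.Chars.isspace cur.length l := by
  induction l generalizing cur acc with
  | nil =>
    rw [PySem.Chars.split₀.go.eq_def]
    by_cases hc : cur = [] <;> simp [hc, pvRuns]
  | cons c rest ih =>
    rw [PySem.Chars.split₀.go.eq_def]
    by_cases hs : PySem.Chars.isspace c
    · by_cases hc : cur = []
      · simp [hs, hc, ih, pvRuns]
      · have : cur.length > 0 := List.length_pos_of_ne_nil hc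
        simp [hs, hc, ih, pvRuns, this]
    · simp [hs, ih, pvRuns]

theorem pv_runs_map (l : List Char) (r : Nat) :
    pvRuns PySem.Chars.isspace r (l.map pvRepl) = pvRuns pvSep r l := by
  induction l generalizing r with
  | nil => rfl
  | cons c cs ih =>
    have hkey : PySem.Chars.isspace (pvRepl c) = pvSep c := by
      by_cases hc : c = '.'
      · subst hc; simp [pvRepl, pvSep]; decide
      · simp [pvRepl, pvSep, hc]
    simp only [List.map_cons, pvRuns, hkey]
    by_cases h : pvSep c <;> simp [h, ih]

theorem pv_alt_loop (cs : List Char) (gs : List Int) (r : Nat) :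
    pvAltLoop cs gs r = if (pvRuns pvSep r cs).map Int.ofNat = gs then 1 else 0 := by
  induction cs generalizing gs r with
  | nil =>
    by_cases hr : r > 0
    · cases gs with
      | nil => simp [pvAltLoop, pvRuns, hr]
      | cons g rest =>
        simp only [pvAltLoop, hr, if_pos, pvRuns]
        by_cases hg : g = (r : Int)
        · cases rest <;> simp [hg]
        · simp [hg, Ne.symm hg]
    · cases gs <;> simp [pvAltLoop, pvRuns, hr]
  | cons c t ih =>
    by_cases hs : pvSep c
    · by_cases hr : r > 0
      · cases gs with
        | nil => simp [pvAltLoop, hs, hr, pvRuns]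
        | cons g rest =>
          simp only [pvAltLoop, hs, if_pos, hr, pvRuns]
          by_cases hg : g = (r : Int)
          · simp [hg, ih]
          · simp [hg, Ne.symm hg]
      · simp [pvAltLoop, hs, hr, pvRuns, ih]
    · simp [pvAltLoop, hs, pvRuns, ih]

-- ===== VERDICT (by name: the statement is the Claim_ definition above) =====
theorem check_trial_spec : Claim_equal_check_trial := by
  intro t g _
  show check_trial t g = check_trial_alt t g
  rw [show check_trial_alt t g = pvAltLoop t.toList g 0 from rfl, pv_alt_loop]
  rw [show check_trial t g = (if (PySem.Str.split₀ (PySem.Str.replace t "." " ")).map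
        (fun run => PySem.Str.len run) = g then 1 else 0) from rfl]
  have h2 : (PySem.Str.replace t "." " ").toList = t.toList.map pvRepl := by
    rw [PySem.Str.toList_replace]
    have hdot : ("." : String).toList = ['.'] := by decide
    have hsp : (" " : String).toList = [' '] := by decide
    rw [hdot, hsp]
    exact pv_replace_eq t.toList
  have h3 : (PySem.Chars.split₀ ((PySem.Str.replace t "." " ").toList)).map List.length
      = pvRuns pvSep 0 t.toList := by
    rw [h2, PySem.Chars.split₀, pv_split_go]
    simpa using pv_runs_map t.toList 0
  have h1 : (PySem.Str.split₀ (PySem.Str.replace t "." " ")).map (fun run => PySem.Str.len run)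
      = (pvRuns pvSep 0 t.toList).map Int.ofNat := by
    calc (PySem.Str.split₀ (PySem.Str.replace t "." " ")).map (fun run => PySem.Str.len run)
        = ((PySem.Str.split₀ (PySem.Str.replace t "." " ")).map String.toList).map
            (fun l => Int.ofNat l.length) := by
          rw [List.map_map]
          exact List.map_congr_left fun a _ => rfl
      _ = (PySem.Chars.split₀ ((PySem.Str.replace t "." " ").toList)).map
            (fun l => Int.ofNat l.length) := by
          rw [PySem.Str.split₀_map_toList]
      _ = ((PySem.Chars.split₀ ((PySem.Str.replace t "." " ").toList)).map List.length).map
            Int.ofNat := by rw [List.map_map]; rfl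
      _ = (pvRuns pvSep 0 t.toList).map Int.ofNat := by rw [h3]
  rw [h1]
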